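-- pv_equiv track=rewrite | github.com/Barez21/My-site | Wiki_scraper/wiki_scraper.py | fuzzy_dedup
-- ===== SOURCE A (Python) =====
-- def levenshtein(a: str, b: str) -> int:
--     if len(a) < len(b): a, b = b, a
--     prev = list(range(len(b)+1))
--     for i, ca in enumerate(a):
--         curr = [i+1]
--         for j, cb in enumerate(b):
--             curr.append(min(prev[j]+(0 if ca==cb else 1), curr[-1]+1, prev[j+1]+1))
--         prev = curr
--     return prev[-1]
--
-- def fuzzy_dedup(records: list, threshold: int = 3) -> tuple:
--     """Najde potenciální duplicity podle podobnosti titulů.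
--     Vrátí (clean_records, duplicate_pairs)."""
--     titles = [(i, r.get("title","").lower()) for i, r in enumerate(records)]
--     pairs = []
--     for i, (idx_a, ta) in enumerate(titles):
--         for idx_b, tb in titles[i+1:]:
--             if abs(len(ta)-len(tb)) > threshold*2: continue
--             d = levenshtein(ta[:40], tb[:40])
--             if 0 < d <= threshold:
--                 pairs.append((records[idx_a]["title"], records[idx_b]["title"], d))
--     return records, pairs
-- ===== SOURCE B (Python) =====
-- def fuzzy_dedup(records: list, threshold: int = 3) -> tuple:
--     """Najde potenciální duplicity podle podobnosti titulů.
--     Vrátí (clean_records, duplicate_pairs)."""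
--     titles = [r.get("title", "").lower() for r in records]
--     n = len(records)
--     pairs = []
--     for i in range(n):
--         for j in range(i + 1, n):
--             ta, tb = titles[i], titles[j]
--             if abs(len(ta) - len(tb)) <= threshold * 2:
--                 d = edit_distance(ta[:40], tb[:40])
--                 if 0 < d <= threshold:
--                     pairs.append((records[i]["title"], records[j]["title"], d))
--     return records, pairs
--
--
-- def edit_distance(a: str, b: str) -> int:
--     def row_for(s: str) -> list:
--         # row_for(s)[j] == edit distance between s and b[j:]
--         if not s:
--             return list(range(len(b), -1, -1))
--         below = row_for(s[1:])
--         row = [below[-1] + 1]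
--         for j in range(len(b) - 1, -1, -1):
--             cost = 0 if s[0] == b[j] else 1
--             row.insert(0, min(below[j + 1] + cost, row[0] + 1, below[j] + 1))
--         return row
--     return row_for(a)[0]
-- ===== Notes on version B (the rewrite author's own statement) =====
-- stated objective: alternative
-- what changed: The bottom-up prefix DP with a rolling row and an argument swap is replaced by a recursive suffix-based computation: a helper recursively builds, for each suffix of the first string, the row of edit distances against all suffixes of the second string (back-to-front, no swap), and the outer pair loop iterates over index ranges instead of enumerate plus list slicing.
import Mathlib
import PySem

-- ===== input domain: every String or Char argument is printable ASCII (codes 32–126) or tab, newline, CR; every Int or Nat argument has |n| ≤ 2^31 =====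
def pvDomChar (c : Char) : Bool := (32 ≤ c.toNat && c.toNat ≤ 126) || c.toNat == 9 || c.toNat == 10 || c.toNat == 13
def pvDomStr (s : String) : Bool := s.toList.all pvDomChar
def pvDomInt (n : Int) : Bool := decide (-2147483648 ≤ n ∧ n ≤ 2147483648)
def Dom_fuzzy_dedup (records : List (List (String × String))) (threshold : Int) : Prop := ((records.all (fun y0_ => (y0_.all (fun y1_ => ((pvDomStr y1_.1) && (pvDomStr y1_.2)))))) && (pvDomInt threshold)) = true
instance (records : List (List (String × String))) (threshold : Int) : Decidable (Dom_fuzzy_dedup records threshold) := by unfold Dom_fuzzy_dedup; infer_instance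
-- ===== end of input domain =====

-- B replaces A's bottom-up rolling-row prefix DP (with its argument swap) by a recursive suffix-row
-- computation and iterates index ranges instead of enumerate+slicing; equal cost, objective: alternative.

-- ===== PORT A =====
-- levenshtein: swap so a is the longer, prev = list(range(len(b)+1)), then rolling rows.
def levA (a0 b0 : List Char) : Int :=
  let ab := if a0.length < b0.length then (b0, a0) else (a0, b0)
  let prev0 : List Int := PySem.List.pyRange 0 ((ab.2.length : Int) + 1) 1
  let prev := (PySem.List.enumerate ab.1 0).foldl (fun prev ica =>
      (PySem.List.enumerate ab.2 0).foldl (fun curr jcb =>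
          curr ++ [min (min (PySem.List.pyGetD prev jcb.1 0 + (if ica.2 == jcb.2 then 0 else 1))
                            (PySem.List.pyGetD curr (-1) 0 + 1))
                       (PySem.List.pyGetD prev (jcb.1 + 1) 0 + 1)]
        ) [ica.1 + 1]
    ) prev0
  PySem.List.pyGetD prev (-1) 0

-- records[idx]["title"] raises KeyError when "title" is absent; that is excluded by Pre_, so the
-- total form Dict.getD … "" is exact on Pre_.
def fuzzy_dedup (records : List (List (String × String))) (threshold : Int) : (List (List (String × String))) × (List (String × String × Int)) :=
  let titles : List (Int × List Char) :=
    (PySem.List.enumerate records 0).map (fun p =>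
      (p.1, PySem.Chars.lower (PySem.Dict.getD (PySem.Dict.mk p.2) "title" "").toList))
  let pairs := (PySem.List.enumerate titles 0).foldl (fun pairs ip =>
      (PySem.List.slice titles (some (ip.1 + 1)) none).foldl (fun pairs q =>
          if |((ip.2.2.length : Int) - (q.2.length : Int))| > threshold * 2 then pairs
          else
            let d := levA (PySem.List.slice ip.2.2 none (some 40)) (PySem.List.slice q.2 none (some 40))
            if 0 < d ∧ d ≤ threshold then
              pairs ++ [(PySem.Dict.getD (PySem.Dict.mk (PySem.List.pyGetD records ip.2.1 [])) "title" "",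
                         PySem.Dict.getD (PySem.Dict.mk (PySem.List.pyGetD records q.1 [])) "title" "", d)]
            else pairs
        ) pairs
    ) []
  (records, pairs)

-- ===== PORT B =====
-- row_for's inner loop: j runs from len(b)-1 down to 0, inserting at the front; the structural
-- recursion on b builds the same list front-first, consuming `below` in lockstep.
def edRowB (c : Char) : List Char → List Int → List Int
  | [], below => [below.headD 0 + 1]
  | y :: bs, below =>
      let r := edRowB c bs below.tail
      (min (min (below.tail.headD 0 + (if c == y then 0 else 1)) (r.headD 0 + 1))
           (below.headD 0 + 1)) :: r

-- row_for(s): recursion on the suffix s of a; base row is list(range(len(b), -1, -1)).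
def edRowsB (b : List Char) : List Char → List Int
  | [] => PySem.List.pyRange (b.length : Int) (-1) (-1)
  | c :: s => edRowB c b (edRowsB b s)

def edit_distance (a b : List Char) : Int := (edRowsB b a).headD 0

def fuzzy_dedup_alt (records : List (List (String × String))) (threshold : Int) : (List (List (String × String))) × (List (String × String × Int)) :=
  let titles : List (List Char) :=
    records.map (fun r => PySem.Chars.lower (PySem.Dict.getD (PySem.Dict.mk r) "title" "").toList)
  let n : Int := records.length
  let pairs := (PySem.List.pyRange 0 n 1).foldl (fun pairs i =>
      (PySem.List.pyRange (i + 1) n 1).foldl (fun pairs j =>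
          let ta := PySem.List.pyGetD titles i []
          let tb := PySem.List.pyGetD titles j []
          if |((ta.length : Int) - (tb.length : Int))| ≤ threshold * 2 then
            let d := edit_distance (PySem.List.slice ta none (some 40)) (PySem.List.slice tb none (some 40))
            if 0 < d ∧ d ≤ threshold then
              pairs ++ [(PySem.Dict.getD (PySem.Dict.mk (PySem.List.pyGetD records i [])) "title" "",
                         PySem.Dict.getD (PySem.Dict.mk (PySem.List.pyGetD records j [])) "title" "", d)]
            else pairs
          else pairs
        ) pairs
    ) ([] : List (String × String × Int))
  (records, pairs)

-- ===== PRECONDITION & SPEC =====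
-- Pre_ excludes exactly the inputs on which A raises KeyError: some record lacks a "title" key
-- while another record's lowered title t would make ("", t) a qualifying pair
-- (0 < len(t[:40]) <= threshold and len(t) <= threshold*2), so records[idx]["title"] is evaluated
-- on the keyless record.
def Pre_fuzzy_dedup (records : List (List (String × String))) (threshold : Int) : Prop :=
  (∀ r ∈ records, PySem.Dict.contains (PySem.Dict.mk r) "title" = true) ∨
  (∀ r ∈ records,
     ¬ (0 < (PySem.Chars.lower (PySem.Dict.getD (PySem.Dict.mk r) "title" "").toList).length ∧
        min ((PySem.Chars.lower (PySem.Dict.getD (PySem.Dict.mk r) "title" "").toList).length : Int) 40 ≤ threshold ∧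
        ((PySem.Chars.lower (PySem.Dict.getD (PySem.Dict.mk r) "title" "").toList).length : Int) ≤ threshold * 2))
instance (records : List (List (String × String))) (threshold : Int) : Decidable (Pre_fuzzy_dedup records threshold) := by unfold Pre_fuzzy_dedup; infer_instance

def pvWitness_fuzzy_dedup : (List (List (String × String))) × Int :=
  ([[("title", "Abc")], [("title", "abd")]], 3)

def Spec_fuzzy_dedup (records : List (List (String × String))) (threshold : Int) (out : (List (List (String × String))) × (List (String × String × Int))) : Prop := out = fuzzy_dedup_alt records threshold
instance (records : List (List (String × String))) (threshold : Int) (out : (List (List (String × String))) × (List (String × String × Int))) : Decidable (Spec_fuzzy_dedup records threshold out) := by unfold Spec_fuzzy_dedup; infer_instance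

-- ===== CLAIM (what is proved, stated in full; the proofs are below) =====
def Claim_equal_fuzzy_dedup : Prop := ∀ (records : List (List (String × String))) (threshold : Int), Dom_fuzzy_dedup records threshold → Pre_fuzzy_dedup records threshold → Spec_fuzzy_dedup records threshold (fuzzy_dedup records threshold)

-- ===== LEMMAS AND PROOFS =====

-- Reference edit distance (head recursion), Int-valued.
def edI : List Char → List Char → Int
  | [], b => b.length
  | a :: as, [] => (a :: as).length
  | x :: a, y :: b =>
      min (min (edI a b + (if x == y then 0 else 1)) (edI (x :: a) b + 1)) (edI a (y :: b) + 1)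
termination_by a b => a.length + b.length
decreasing_by all_goals (simp [List.length]; try omega)

theorem edI_nil_right (a : List Char) : edI a [] = a.length := by
  cases a <;> simp [edI]

theorem edI_nil_left (b : List Char) : edI [] b = b.length := by
  cases b <;> simp [edI]

theorem edI_cons_cons (x y : Char) (a b : List Char) :
    edI (x :: a) (y :: b)
      = min (min (edI a b + (if x == y then 0 else 1)) (edI (x :: a) b + 1))
            (edI a (y :: b) + 1) := by
  rw [edI]

theorem edI_symm (a b : List Char) : edI a b = edI b a := by
  have H : ∀ (n : Nat) (a b : List Char), a.length + b.length = n → edI a b = edI b a := by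
    intro n
    induction n using Nat.strong_induction_on with
    | _ n ih =>
      intro a b hn
      match a, b with
      | [], b => rw [edI_nil_left, edI_nil_right]
      | x :: a', [] => rw [edI_nil_left, edI_nil_right]
      | x :: a', y :: b' =>
        have h1 := ih (a'.length + b'.length) (by simp at hn; omega) a' b' rfl
        have h2 := ih (a'.length + (y :: b').length) (by simp at hn ⊢; omega) a' (y :: b') rfl
        have h3 := ih ((x :: a').length + b'.length) (by simp at hn ⊢; omega) (x :: a') b' rfl
        have hc : (x == y) = (y == x) := by
          by_cases h : x = y
          · simp [h]
          · have h' : ¬ y = x := fun e => h e.symm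
            simp [h, h']
        simp only [edI]
        rw [h1, h2, h3, hc]
        omega
  exact H (a.length + b.length) a b rfl

theorem edI_snoc (x y : Char) (a b : List Char) :
    edI (a ++ [x]) (b ++ [y])
      = min (min (edI a b + (if x == y then 0 else 1)) (edI (a ++ [x]) b + 1))
            (edI a (b ++ [y]) + 1) := by
  have H : ∀ (n : Nat) (a b : List Char), a.length + b.length = n →
      edI (a ++ [x]) (b ++ [y])
        = min (min (edI a b + (if x == y then 0 else 1)) (edI (a ++ [x]) b + 1))
              (edI a (b ++ [y]) + 1) := by
    intro n
    induction n using Nat.strong_induction_on with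
    | _ n ih =>
      intro a b hn
      match a, b with
      | [], [] => simp [edI_cons_cons, edI_nil_left, edI_nil_right]
      | [], w :: Q =>
        have i1 := ih Q.length (by simp at hn; omega) [] Q (by simp)
        have L := edI_cons_cons x w [] (Q ++ [y])
        have r2 := edI_cons_cons x w [] Q
        simp only [List.nil_append, List.cons_append] at i1 L r2 ⊢
        rw [L, i1, r2]
        simp only [edI_nil_left, List.length_append, List.length_cons, List.length_nil]
        generalize edI [x] Q = e
        simp only [min_add]
        apply le_antisymm <;> simp only [le_min_iff, min_le_iff] <;> omega
      | u :: P, [] =>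
        have i1 := ih P.length (by simp at hn; omega) P [] (by simp)
        have L := edI_cons_cons u y (P ++ [x]) []
        have r3 := edI_cons_cons u y P []
        simp only [List.nil_append, List.cons_append] at i1 L r3 ⊢
        rw [L, i1, r3]
        simp only [edI_nil_right, List.length_append, List.length_cons,
          List.length_nil]
        generalize edI P [x] = e
        simp only [min_add]
        apply le_antisymm <;> simp only [le_min_iff, min_le_iff] <;> omega
      | u :: P, w :: Q =>
        have u1 := ih (P.length + Q.length) (by simp at hn; omega) P Q rfl
        have u2 := ih ((u :: P).length + Q.length) (by simp at hn ⊢; omega) (u :: P) Q rfl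
        have u3 := ih (P.length + (w :: Q).length) (by simp at hn ⊢; omega) P (w :: Q) rfl
        have L := edI_cons_cons u w (P ++ [x]) (Q ++ [y])
        have r1 := edI_cons_cons u w P Q
        have r2 := edI_cons_cons u w (P ++ [x]) Q
        have r3 := edI_cons_cons u w P (Q ++ [y])
        simp only [List.cons_append] at u1 u2 u3 L r1 r2 r3 ⊢
        rw [L, u1, u2, u3, r1, r2, r3]
        generalize edI P Q = e1
        generalize edI P (Q ++ [y]) = e2
        generalize edI (P ++ [x]) Q = e3
        generalize edI P (w :: Q) = e4
        generalize edI P (w :: (Q ++ [y])) = e5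
        generalize edI (P ++ [x]) (w :: Q) = e6
        generalize edI (u :: P) Q = e7
        generalize edI (u :: P) (Q ++ [y]) = e8
        generalize edI (u :: (P ++ [x])) Q = e9
        simp only [min_add]
        apply le_antisymm <;> simp only [le_min_iff, min_le_iff] <;> omega
  exact H (a.length + b.length) a b rfl

theorem edI_rev (a b : List Char) : edI a.reverse b.reverse = edI a b := by
  have H : ∀ (n : Nat) (a b : List Char), a.length + b.length = n →
      edI a.reverse b.reverse = edI a b := by
    intro n
    induction n using Nat.strong_induction_on with
    | _ n ih =>
      intro a b hn
      match a, b with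
      | [], b => simp [edI_nil_left]
      | x :: P, [] => simp [edI_nil_right]
      | x :: P, y :: Q =>
        have h1 := ih (P.length + Q.length) (by simp at hn; omega) P Q rfl
        have h2 := ih ((x :: P).length + Q.length) (by simp at hn ⊢; omega) (x :: P) Q rfl
        have h3 := ih (P.length + (y :: Q).length) (by simp at hn ⊢; omega) P (y :: Q) rfl
        rw [List.reverse_cons, List.reverse_cons, edI_snoc]
        rw [← List.reverse_cons, ← List.reverse_cons, h1, h2, h3]
        rw [edI_cons_cons]
  exact H (a.length + b.length) a b rfl

theorem levA_inner (ca : Char) (P b : List Char) :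
    ∀ (bs : List Char) (s : Nat), s ≤ b.length → bs = b.drop s →
    (PySem.List.enumerate bs (s : Int)).foldl
      (fun curr jcb =>
        curr ++ [min (min (PySem.List.pyGetD ((List.range (b.length + 1)).map (fun j => edI P ((b.take j).reverse))) jcb.1 0
                            + (if ca == jcb.2 then 0 else 1))
                     (PySem.List.pyGetD curr (-1) 0 + 1))
                 (PySem.List.pyGetD ((List.range (b.length + 1)).map (fun j => edI P ((b.take j).reverse))) (jcb.1 + 1) 0 + 1)])
      ((List.range (s + 1)).map (fun j => edI (ca :: P) ((b.take j).reverse)))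
    = (List.range (b.length + 1)).map (fun j => edI (ca :: P) ((b.take j).reverse)) := by
  intro bs
  induction bs with
  | nil =>
      intro s hs hdrop
      have hlen : b.length ≤ s := by
        have h := congrArg List.length hdrop
        simp at h
        omega
      have hseq : s = b.length := le_antisymm hs hlen
      subst hseq
      simp [PySem.List.enumerate]
  | cons cb bs' ih =>
      intro s hs hdrop
      have hlt : s < b.length := by
        by_contra h
        rw [List.drop_eq_nil_of_le (by omega)] at hdrop
        simp at hdrop
      rw [List.drop_eq_getElem_cons hlt] at hdrop
      have hcb : cb = b[s] := (List.cons.injEq _ _ _ _ ▸ hdrop).1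
      have hbs' : bs' = b.drop (s + 1) := (List.cons.injEq _ _ _ _ ▸ hdrop).2
      rw [PySem.List.enumerate_cons, List.foldl_cons]
      have hg1 : PySem.List.pyGetD ((List.range (b.length + 1)).map (fun j => edI P ((b.take j).reverse))) ((s : Int)) 0
          = edI P ((b.take s).reverse) := by
        rw [PySem.List.pyGetD_natCast, PySem.List.getD_map_range _ _ _ _ (by omega)]
      have hg2 : PySem.List.pyGetD ((List.range (b.length + 1)).map (fun j => edI P ((b.take j).reverse))) ((s : Int) + 1) 0
          = edI P ((b.take (s + 1)).reverse) := by
        have : ((s : Int) + 1) = ((s + 1 : Nat) : Int) := by push_cast; ring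
        rw [this, PySem.List.pyGetD_natCast, PySem.List.getD_map_range _ _ _ _ (by omega)]
      have hcurr : PySem.List.pyGetD ((List.range (s + 1)).map (fun j => edI (ca :: P) ((b.take j).reverse))) (-1) 0
          = edI (ca :: P) ((b.take s).reverse) := by
        rw [List.range_succ, List.map_append]
        exact PySem.List.pyGetD_neg_one_append_singleton _ _ _
      have htake : b.take (s + 1) = b.take s ++ [b[s]] := by
        rw [List.take_add_one]
        simp [List.getElem?_eq_getElem hlt]
      have hmin : min (min (edI P ((b.take s).reverse) + (if ca == cb then 0 else 1))
                      (edI (ca :: P) ((b.take s).reverse) + 1))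
                  (edI P ((b.take (s + 1)).reverse) + 1)
          = edI (ca :: P) ((b.take (s + 1)).reverse) := by
        rw [htake, List.reverse_append, List.reverse_cons]
        simp only [List.reverse_nil, List.nil_append, List.singleton_append]
        rw [edI_cons_cons, hcb]
      rw [hg1, hg2, hcurr, hmin]
      have hacc : (List.range (s + 1)).map (fun j => edI (ca :: P) ((b.take j).reverse))
            ++ [edI (ca :: P) ((b.take (s + 1)).reverse)]
          = (List.range (s + 1 + 1)).map (fun j => edI (ca :: P) ((b.take j).reverse)) := by
        rw [List.range_succ (n := s + 1), List.map_append]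
        simp
      rw [hacc]
      have hcast : (s : Int) + 1 = ((s + 1 : Nat) : Int) := by push_cast; ring
      rw [hcast]
      exact ih (s + 1) (by omega) hbs'

theorem levA_outer (a b : List Char) :
    ∀ (as : List Char) (i : Nat), i ≤ a.length → as = a.drop i →
    (PySem.List.enumerate as (i : Int)).foldl
      (fun prev ica =>
        (PySem.List.enumerate b 0).foldl
          (fun curr jcb =>
            curr ++ [min (min (PySem.List.pyGetD prev jcb.1 0 + (if ica.2 == jcb.2 then 0 else 1))
                         (PySem.List.pyGetD curr (-1) 0 + 1))
                     (PySem.List.pyGetD prev (jcb.1 + 1) 0 + 1)])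
          [ica.1 + 1])
      ((List.range (b.length + 1)).map (fun j => edI ((a.take i).reverse) ((b.take j).reverse)))
    = (List.range (b.length + 1)).map (fun j => edI a.reverse ((b.take j).reverse)) := by
  intro as
  induction as with
  | nil =>
      intro i hi hdrop
      have hlen : a.length ≤ i := by
        have h := congrArg List.length hdrop
        simp at h
        omega
      have : i = a.length := le_antisymm hi hlen
      subst this
      simp [PySem.List.enumerate, List.take_length]
  | cons ca as' ih =>
      intro i hi hdrop
      have hlt : i < a.length := by
        by_contra h
        rw [List.drop_eq_nil_of_le (by omega)] at hdrop
        simp at hdrop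
      rw [List.drop_eq_getElem_cons hlt] at hdrop
      have hca : ca = a[i] := (List.cons.injEq _ _ _ _ ▸ hdrop).1
      have has' : as' = a.drop (i + 1) := (List.cons.injEq _ _ _ _ ▸ hdrop).2
      rw [PySem.List.enumerate_cons, List.foldl_cons]
      dsimp only
      have hinit : [(i : Int) + 1] = (List.range (0 + 1)).map (fun j => edI (ca :: (a.take i).reverse) ((b.take j).reverse)) := by
        simp [edI_nil_right, List.length_reverse, List.length_take, min_eq_left (le_of_lt hlt)]
      have hinner := levA_inner ca ((a.take i).reverse) b b 0 (by omega) (by simp)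
      rw [Nat.cast_zero] at hinner
      rw [hinit, hinner]
      have hstep : (fun j => edI (ca :: (a.take i).reverse) ((b.take j).reverse))
          = (fun j => edI ((a.take (i + 1)).reverse) ((b.take j).reverse)) := by
        funext j
        have : a.take (i + 1) = a.take i ++ [a[i]] := by
          rw [List.take_add_one]
          simp [List.getElem?_eq_getElem hlt]
        rw [this, List.reverse_append]
        simp [hca]
      rw [hstep]
      have hcast : (i : Int) + 1 = ((i + 1 : Nat) : Int) := by push_cast; ring
      rw [hcast]
      exact ih (i + 1) (by omega) has'

theorem lev_run (a b : List Char) :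
    (PySem.List.enumerate a 0).foldl
      (fun prev ica =>
        (PySem.List.enumerate b 0).foldl
          (fun curr jcb =>
            curr ++ [min (min (PySem.List.pyGetD prev jcb.1 0 + (if ica.2 == jcb.2 then 0 else 1))
                         (PySem.List.pyGetD curr (-1) 0 + 1))
                     (PySem.List.pyGetD prev (jcb.1 + 1) 0 + 1)])
          [ica.1 + 1])
      (PySem.List.pyRange 0 ((b.length : Int) + 1) 1)
    = (List.range (b.length + 1)).map (fun j => edI a.reverse ((b.take j).reverse)) := by
  have hinit : PySem.List.pyRange 0 ((b.length : Int) + 1) 1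
      = (List.range (b.length + 1)).map (fun j => edI ((a.take 0).reverse) ((b.take j).reverse)) := by
    have h1 : ((b.length : Int) + 1) = ((b.length + 1 : Nat) : Int) := by push_cast; ring
    rw [h1, PySem.List.pyRange_zero_nat]
    refine List.map_congr_left (fun j hj => ?_)
    rw [List.mem_range] at hj
    simp [edI_nil_left, List.length_reverse, List.length_take]
    omega
  have houter := levA_outer a b a 0 (by omega) (by simp)
  rw [Nat.cast_zero] at houter
  rw [hinit, houter]

theorem lev_fin (x y : List Char) :
    PySem.List.pyGetD ((List.range (y.length + 1)).map (fun j => edI x.reverse ((y.take j).reverse))) (-1) 0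
      = edI x y := by
  rw [List.range_succ, List.map_append, List.map_singleton,
    PySem.List.pyGetD_neg_one_append_singleton, List.take_length, edI_rev]

theorem lev_eq_edI (a b : List Char) : levA a b = edI a b := by
  by_cases h : a.length < b.length
  · simp only [levA, if_pos h]
    rw [lev_run b a, lev_fin b a, edI_symm]
  · simp only [levA, if_neg h]
    rw [lev_run a b, lev_fin a b]

-- suffix list of b: [b, b[1:], …, []]
def suffs : List Char → List (List Char)
  | [] => [[]]
  | c :: s => (c :: s) :: suffs s

theorem suffs_map_headD {β : Type} (f : List Char → β) (d : β) (b : List Char) :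
    ((suffs b).map f).headD d = f b := by
  cases b <;> simp [suffs]

theorem pyRange_down (b : List Char) :
    PySem.List.pyRange (b.length : Int) (-1) (-1) = (suffs b).map (fun t => (t.length : Int)) := by
  induction b with
  | nil =>
      rw [PySem.List.pyRange_neg_one_cons (by norm_num)]
      rw [PySem.List.pyRange_neg_one_eq_nil (by norm_num)]
      simp [suffs]
  | cons y bs ih =>
      have h : ((y :: bs).length : Int) = (bs.length : Int) + 1 := by simp
      rw [h, PySem.List.pyRange_neg_one_cons (by omega)]
      simp only [add_sub_cancel_right]
      rw [ih]
      simp [suffs]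

theorem edRowB_spec (c : Char) (s : List Char) (b : List Char) :
    edRowB c b ((suffs b).map (fun t => edI s t)) = (suffs b).map (fun t => edI (c :: s) t) := by
  induction b with
  | nil => simp [suffs, edRowB, edI_nil_right]
  | cons y bs ih =>
      simp only [suffs, List.map_cons, edRowB, List.tail_cons, ih,
        suffs_map_headD, List.headD_cons]
      rw [show edI (c :: s) (y :: bs)
            = min (min (edI s bs + (if c == y then 0 else 1)) (edI (c :: s) bs + 1))
                  (edI s (y :: bs) + 1) from by rw [edI]]

theorem edRowsB_spec (b a : List Char) : edRowsB b a = (suffs b).map (fun t => edI a t) := by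
  induction a with
  | nil =>
      rw [edRowsB, pyRange_down]
      exact List.map_congr_left (fun t _ => by rw [show edI [] t = (t.length : Int) from by cases t <;> simp [edI]])
  | cons c s ih => rw [edRowsB, ih, edRowB_spec]

theorem edit_distance_eq_edI (a b : List Char) : edit_distance a b = edI a b := by
  rw [edit_distance, edRowsB_spec, suffs_map_headD]

-- lowered title of one record / raw title of one record
def titleOf (r : List (String × String)) : List Char :=
  PySem.Chars.lower (PySem.Dict.getD (PySem.Dict.mk r) "title" "").toList

-- the pair contributed by one (i, ta) (j, tb) candidate, with edI as the distance
def pairCand (R : List (List (String × String))) (t : Int) (ia jb : Int × List Char) :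
    List (String × String × Int) :=
  if |((ia.2.length : Int) - (jb.2.length : Int))| > t * 2 then []
  else if 0 < edI (PySem.List.slice ia.2 none (some 40)) (PySem.List.slice jb.2 none (some 40)) ∧
          edI (PySem.List.slice ia.2 none (some 40)) (PySem.List.slice jb.2 none (some 40)) ≤ t then
    [(PySem.Dict.getD (PySem.Dict.mk (PySem.List.pyGetD R ia.1 [])) "title" "",
      PySem.Dict.getD (PySem.Dict.mk (PySem.List.pyGetD R jb.1 [])) "title" "",
      edI (PySem.List.slice ia.2 none (some 40)) (PySem.List.slice jb.2 none (some 40)))]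
  else []

-- both pairs lists reduce to this common normal form
def commonPairs (R : List (List (String × String))) (t : Int) : List (String × String × Int) :=
  (PySem.List.pyRange 0 (R.length : Int) 1).flatMap (fun i =>
    (PySem.List.pyRange (i + 1) (R.length : Int) 1).flatMap (fun j =>
      pairCand R t (i, titleOf (PySem.List.pyGetD R i [])) (j, titleOf (PySem.List.pyGetD R j []))))

theorem enumerate_drop {α : Type} (xs : List α) :
    ∀ (k : Nat) (s : Int), (PySem.List.enumerate xs s).drop k = PySem.List.enumerate (xs.drop k) (s + k) := by
  induction xs with
  | nil => intro k s; simp [PySem.List.enumerate]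
  | cons x xs ih =>
      intro k s
      cases k with
      | zero => simp
      | succ k =>
          rw [PySem.List.enumerate_cons, List.drop_succ_cons, List.drop_succ_cons, ih k (s + 1)]
          congr 1
          push_cast
          ring

theorem flatMap_enumerate_pyRange {α β : Type} (R : List α) (d : α) (G : Int × α → List β) :
    ∀ (xs : List α) (k : Nat), k ≤ R.length → xs = R.drop k →
      (PySem.List.enumerate xs (k : Int)).flatMap G
        = (PySem.List.pyRange (k : Int) (R.length : Int) 1).flatMap
            (fun j => G (j, PySem.List.pyGetD R j d)) := by
  intro xs
  induction xs with
  | nil =>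
      intro k hk hdrop
      have hlen : R.length ≤ k := by
        have h := congrArg List.length hdrop
        simp at h
        omega
      rw [PySem.List.pyRange_one_eq_nil (by omega)]
      simp [PySem.List.enumerate]
  | cons x xs' ih =>
      intro k hk hdrop
      have hlt : k < R.length := by
        by_contra h
        rw [List.drop_eq_nil_of_le (by omega)] at hdrop
        simp at hdrop
      rw [List.drop_eq_getElem_cons hlt] at hdrop
      have hx : x = R[k] := (List.cons.injEq _ _ _ _ ▸ hdrop).1
      have hxs' : xs' = R.drop (k + 1) := (List.cons.injEq _ _ _ _ ▸ hdrop).2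
      rw [PySem.List.enumerate_cons, List.flatMap_cons,
        PySem.List.pyRange_one_cons (by exact_mod_cast hlt), List.flatMap_cons]
      have hget : PySem.List.pyGetD R ((k : Nat) : Int) d = R[k] := by
        rw [PySem.List.pyGetD_eq_getElem _ _ (by omega) (by exact_mod_cast hlt)]
        simp
      rw [hget, ← hx]
      have hcast : (k : Int) + 1 = ((k + 1 : Nat) : Int) := by push_cast; ring
      rw [hcast, ih (k + 1) (by omega) hxs']

theorem foldl_append_of_pointwise {α β : Type} (l : List α) (F : List β → α → List β)
    (G : α → List β) (init : List β) (h : ∀ x ∈ l, ∀ acc, F acc x = acc ++ G x) :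
    l.foldl F init = init ++ l.flatMap G := by
  rw [PySem.List.foldl_congr_mem' l F (fun acc x => acc ++ G x) init h]
  exact PySem.List.foldl_append_eq_flatMap G l init

theorem pairsA_norm (R : List (List (String × String))) (t : Int) (T : List (Int × List Char))
    (hT : T = (PySem.List.enumerate R 0).map (fun p => (p.1, titleOf p.2))) :
    (PySem.List.enumerate T 0).foldl (fun pairs ip =>
      (PySem.List.slice T (some (ip.1 + 1)) none).foldl (fun pairs q =>
          if |((ip.2.2.length : Int) - (q.2.length : Int))| > t * 2 then pairs
          else
            if 0 < levA (PySem.List.slice ip.2.2 none (some 40)) (PySem.List.slice q.2 none (some 40)) ∧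
               levA (PySem.List.slice ip.2.2 none (some 40)) (PySem.List.slice q.2 none (some 40)) ≤ t then
              pairs ++ [(PySem.Dict.getD (PySem.Dict.mk (PySem.List.pyGetD R ip.2.1 [])) "title" "",
                         PySem.Dict.getD (PySem.Dict.mk (PySem.List.pyGetD R q.1 [])) "title" "",
                         levA (PySem.List.slice ip.2.2 none (some 40)) (PySem.List.slice q.2 none (some 40)))]
            else pairs
        ) pairs) []
    = commonPairs R t := by
  have hTlen : T.length = R.length := by rw [hT]; simp
  -- inner body as an append of pairCand
  have hinner : ∀ ip : Int × (Int × List Char), ∀ acc : List (String × String × Int),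
      (PySem.List.slice T (some (ip.1 + 1)) none).foldl (fun pairs q =>
          if |((ip.2.2.length : Int) - (q.2.length : Int))| > t * 2 then pairs
          else
            if 0 < levA (PySem.List.slice ip.2.2 none (some 40)) (PySem.List.slice q.2 none (some 40)) ∧
               levA (PySem.List.slice ip.2.2 none (some 40)) (PySem.List.slice q.2 none (some 40)) ≤ t then
              pairs ++ [(PySem.Dict.getD (PySem.Dict.mk (PySem.List.pyGetD R ip.2.1 [])) "title" "",
                         PySem.Dict.getD (PySem.Dict.mk (PySem.List.pyGetD R q.1 [])) "title" "",
                         levA (PySem.List.slice ip.2.2 none (some 40)) (PySem.List.slice q.2 none (some 40)))]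
            else pairs) acc
        = acc ++ (PySem.List.slice T (some (ip.1 + 1)) none).flatMap (fun q => pairCand R t ip.2 q) := by
    intro ip acc
    refine foldl_append_of_pointwise _ _ _ acc (fun q _ acc => ?_)
    simp only [pairCand, lev_eq_edI]
    split_ifs <;> simp
  rw [foldl_append_of_pointwise (PySem.List.enumerate T 0)
      (fun pairs ip =>
        (PySem.List.slice T (some (ip.1 + 1)) none).foldl (fun pairs q =>
          if |((ip.2.2.length : Int) - (q.2.length : Int))| > t * 2 then pairs
          else
            if 0 < levA (PySem.List.slice ip.2.2 none (some 40)) (PySem.List.slice q.2 none (some 40)) ∧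
               levA (PySem.List.slice ip.2.2 none (some 40)) (PySem.List.slice q.2 none (some 40)) ≤ t then
              pairs ++ [(PySem.Dict.getD (PySem.Dict.mk (PySem.List.pyGetD R ip.2.1 [])) "title" "",
                         PySem.Dict.getD (PySem.Dict.mk (PySem.List.pyGetD R q.1 [])) "title" "",
                         levA (PySem.List.slice ip.2.2 none (some 40)) (PySem.List.slice q.2 none (some 40)))]
            else pairs) pairs)
      (fun ip => (PySem.List.slice T (some (ip.1 + 1)) none).flatMap (fun q => pairCand R t ip.2 q))
      []
      (fun ip _ acc => hinner ip acc), List.nil_append]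
  -- outer enumerate → pyRange
  have h0 := flatMap_enumerate_pyRange T ((0 : Int), ([] : List Char))
      (fun ip => (PySem.List.slice T (some (ip.1 + 1)) none).flatMap (fun q => pairCand R t ip.2 q))
      T 0 (by omega) (by simp)
  rw [Nat.cast_zero] at h0
  rw [h0, hTlen]
  unfold commonPairs
  refine List.flatMap_congr (fun i hi => ?_)
  rw [PySem.List.mem_pyRange_one] at hi
  have hiR : i < (R.length : Int) := hi.2
  have h0i : 0 ≤ i := hi.1
  beta_reduce
  -- the indexed element of T
  have hTi : PySem.List.pyGetD T i ((0 : Int), ([] : List Char))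
      = (i, titleOf (PySem.List.pyGetD R i [])) := by
    have hb : i < (T.length : Int) := by omega
    rw [PySem.List.pyGetD_eq_getElem _ _ h0i hb]
    simp only [hT, List.getElem_map, PySem.List.getElem_enumerate]
    rw [PySem.List.pyGetD_eq_getElem _ _ h0i (by exact_mod_cast hiR)]
    simp [Int.toNat_of_nonneg h0i]
  rw [hTi]
  dsimp only
  -- the inner list: titles[i+1:] → pyRange (i+1) n
  have hslice : PySem.List.slice T (some (i + 1)) none = T.drop (i + 1).toNat :=
    PySem.List.slice_from T (by omega)
  have hk1 : ((i + 1).toNat : Int) = i + 1 := Int.toNat_of_nonneg (by omega)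
  have hkle : (i + 1).toNat ≤ R.length := by omega
  rw [hslice, hT, ← List.map_drop, List.flatMap_map]
  have hdrop : (PySem.List.enumerate R 0).drop (i + 1).toNat
      = PySem.List.enumerate (R.drop (i + 1).toNat) (((i + 1).toNat : Nat) : Int) := by
    rw [enumerate_drop R ((i + 1).toNat) 0]
    congr 1
    omega
  rw [hdrop]
  rw [flatMap_enumerate_pyRange R ([] : List (String × String))
      (fun p => pairCand R t (i, titleOf (PySem.List.pyGetD R i [])) (p.1, titleOf p.2))
      (R.drop (i + 1).toNat) ((i + 1).toNat) hkle rfl]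
  rw [hk1]

theorem pairsB_norm (R : List (List (String × String))) (t : Int) (T : List (List Char))
    (hT : T = R.map titleOf) :
    (PySem.List.pyRange 0 (R.length : Int) 1).foldl (fun pairs i =>
      (PySem.List.pyRange (i + 1) (R.length : Int) 1).foldl (fun pairs j =>
          if |(((PySem.List.pyGetD T i []).length : Int) - ((PySem.List.pyGetD T j []).length : Int))| ≤ t * 2 then
            if 0 < edit_distance (PySem.List.slice (PySem.List.pyGetD T i []) none (some 40))
                     (PySem.List.slice (PySem.List.pyGetD T j []) none (some 40)) ∧
               edit_distance (PySem.List.slice (PySem.List.pyGetD T i []) none (some 40))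
                     (PySem.List.slice (PySem.List.pyGetD T j []) none (some 40)) ≤ t then
              pairs ++ [(PySem.Dict.getD (PySem.Dict.mk (PySem.List.pyGetD R i [])) "title" "",
                         PySem.Dict.getD (PySem.Dict.mk (PySem.List.pyGetD R j [])) "title" "",
                         edit_distance (PySem.List.slice (PySem.List.pyGetD T i []) none (some 40))
                           (PySem.List.slice (PySem.List.pyGetD T j []) none (some 40)))]
            else pairs
          else pairs
        ) pairs) []
    = commonPairs R t := by
  have hTget : ∀ (k : Int), 0 ≤ k → k < (R.length : Int) →
      PySem.List.pyGetD T k [] = titleOf (PySem.List.pyGetD R k []) := by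
    intro k h0 hk
    have hb : k < (T.length : Int) := by
      rw [hT, List.length_map]
      exact hk
    rw [PySem.List.pyGetD_eq_getElem _ _ h0 hb]
    simp only [hT, List.getElem_map]
    rw [PySem.List.pyGetD_eq_getElem _ _ h0 (by exact_mod_cast hk)]
  have hinner : ∀ (i : Int), ∀ acc : List (String × String × Int),
      (PySem.List.pyRange (i + 1) (R.length : Int) 1).foldl (fun pairs j =>
          if |(((PySem.List.pyGetD T i []).length : Int) - ((PySem.List.pyGetD T j []).length : Int))| ≤ t * 2 then
            if 0 < edit_distance (PySem.List.slice (PySem.List.pyGetD T i []) none (some 40))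
                     (PySem.List.slice (PySem.List.pyGetD T j []) none (some 40)) ∧
               edit_distance (PySem.List.slice (PySem.List.pyGetD T i []) none (some 40))
                     (PySem.List.slice (PySem.List.pyGetD T j []) none (some 40)) ≤ t then
              pairs ++ [(PySem.Dict.getD (PySem.Dict.mk (PySem.List.pyGetD R i [])) "title" "",
                         PySem.Dict.getD (PySem.Dict.mk (PySem.List.pyGetD R j [])) "title" "",
                         edit_distance (PySem.List.slice (PySem.List.pyGetD T i []) none (some 40))
                           (PySem.List.slice (PySem.List.pyGetD T j []) none (some 40)))]
            else pairs
          else pairs) acc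
        = acc ++ (PySem.List.pyRange (i + 1) (R.length : Int) 1).flatMap (fun j =>
            pairCand R t (i, PySem.List.pyGetD T i []) (j, PySem.List.pyGetD T j [])) := by
    intro i acc
    refine foldl_append_of_pointwise _ _ _ acc (fun j _ acc => ?_)
    simp only [pairCand, edit_distance_eq_edI]
    generalize |(((PySem.List.pyGetD T i []).length : Int) - ((PySem.List.pyGetD T j []).length : Int))| = M
    split_ifs <;> first | (exfalso; omega) | simp
  rw [foldl_append_of_pointwise (PySem.List.pyRange 0 (R.length : Int) 1)
      (fun pairs i =>
        (PySem.List.pyRange (i + 1) (R.length : Int) 1).foldl (fun pairs j =>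
          if |(((PySem.List.pyGetD T i []).length : Int) - ((PySem.List.pyGetD T j []).length : Int))| ≤ t * 2 then
            if 0 < edit_distance (PySem.List.slice (PySem.List.pyGetD T i []) none (some 40))
                     (PySem.List.slice (PySem.List.pyGetD T j []) none (some 40)) ∧
               edit_distance (PySem.List.slice (PySem.List.pyGetD T i []) none (some 40))
                     (PySem.List.slice (PySem.List.pyGetD T j []) none (some 40)) ≤ t then
              pairs ++ [(PySem.Dict.getD (PySem.Dict.mk (PySem.List.pyGetD R i [])) "title" "",
                         PySem.Dict.getD (PySem.Dict.mk (PySem.List.pyGetD R j [])) "title" "",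
                         edit_distance (PySem.List.slice (PySem.List.pyGetD T i []) none (some 40))
                           (PySem.List.slice (PySem.List.pyGetD T j []) none (some 40)))]
            else pairs
          else pairs) pairs)
      (fun i => (PySem.List.pyRange (i + 1) (R.length : Int) 1).flatMap (fun j =>
            pairCand R t (i, PySem.List.pyGetD T i []) (j, PySem.List.pyGetD T j [])))
      []
      (fun i _ acc => hinner i acc), List.nil_append]
  unfold commonPairs
  refine List.flatMap_congr (fun i hi => ?_)
  rw [PySem.List.mem_pyRange_one] at hi
  beta_reduce
  rw [hTget i hi.1 hi.2]
  refine List.flatMap_congr (fun j hj => ?_)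
  rw [PySem.List.mem_pyRange_one] at hj
  beta_reduce
  rw [hTget j (by omega) hj.2]

theorem main_eq (records : List (List (String × String))) (threshold : Int) :
    fuzzy_dedup records threshold = fuzzy_dedup_alt records threshold := by
  simp only [fuzzy_dedup, fuzzy_dedup_alt]
  rw [pairsA_norm records threshold
        ((PySem.List.enumerate records 0).map
          (fun p => (p.1, PySem.Chars.lower (PySem.Dict.getD (PySem.Dict.mk p.2) "title" "").toList)))
        rfl,
      pairsB_norm records threshold
        (records.map (fun r => PySem.Chars.lower (PySem.Dict.getD (PySem.Dict.mk r) "title" "").toList))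
        rfl]

-- ===== VERDICT (by name: the statement is the Claim_ definition above) =====
theorem fuzzy_dedup_spec : Claim_equal_fuzzy_dedup := by
  intro records threshold _ _
  unfold Spec_fuzzy_dedup
  exact main_eq records threshold
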